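-- pv_equiv track=rewrite | github.com/Divyae52/TCAWCodeLinks | CodeLink 11.py | tiltDown
-- ===== SOURCE A (Python) =====
-- def tiltLeft(board):
--
--     newBoard = [
--                 [0,0,0,0],
--                 [0,0,0,0],
--                 [0,0,0,0],
--                 [0,0,0,0]]
--
--     for row in range(0,4):
--
--         # first slide through any spaces
--         loading = 0
--         for col in range(0, 4):
--             if board[row][col] != 0:
--                 newBoard[row][loading] = board[row][col]
--                 loading = loading + 1
--
--         # do resulting columns 0 and 1 match?
--         if (newBoard[row][0] == newBoard[row][1]):
--
--             # combine and slide
--             newBoard[row][0] = newBoard[row][0] * 2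
--             newBoard[row][1] = newBoard[row][2]
--             newBoard[row][2] = newBoard[row][3]
--             newBoard[row][3] = 0
--
--             # do resulting 1 and 2 match?
--             if (newBoard[row][1] == newBoard[row][2]):
--
--                 # combine and slide, then finished
--                 newBoard[row][1] = newBoard[row][1] * 2
--                 newBoard[row][2] = newBoard[row][3]
--                 newBoard[row][3] = 0
--
--             elif (newBoard[row][2] == newBoard[row][3]):
--
--                 # combine and slide, then finished
--                 newBoard[row][2] = newBoard[row][2] * 2
--                 newBoard[row][3] = 0
--
--         elif (newBoard[row][1] == newBoard[row][2]):
--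
--             # combine and slide, then finished
--             newBoard[row][1] = newBoard[row][1] * 2
--             newBoard[row][2] = newBoard[row][3]
--             newBoard[row][3] = 0
--
--         elif (newBoard[row][2] == newBoard[row][3]):
--
--             # combine and slide, then finished
--             newBoard[row][2] = newBoard[row][2] * 2
--             newBoard[row][3] = 0
--
--     return newBoard
--
-- def tiltDown(board):
--
--     newBoard1 = [
--                 [0,0,0,0],
--                 [0,0,0,0],
--                 [0,0,0,0],
--                 [0,0,0,0]]
--
--     newBoard2 = [[0,0,0,0],
--              [0,0,0,0],
--              [0,0,0,0],
--              [0,0,0,0]]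
--
--     # rotate the board to the right
--     for col in range(0, 4):
--         loading = 0
--         for row in range(3,-1,-1):
--             newBoard1[col][loading] = board[row][col]
--             loading = loading + 1
--
--     # tilt the resulting board left
--     newBoard1 = tiltLeft(newBoard1)
--
--     # rotate the board back to the left
--     loading = 0
--     for col in range(3,-1,-1):
--         for row in range(0,4):
--             newBoard2[loading][row] = newBoard1[row][col]
--         loading = loading + 1
--
--     return newBoard2
-- ===== SOURCE B (Python) =====
-- def _merge(vals):
--     # merge equal neighbours front-first (front = bottom of the column)
--     if len(vals) >= 2 and vals[0] == vals[1]: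
--         return [vals[0] * 2] + _merge(vals[2:])
--     if vals:
--         return [vals[0]] + _merge(vals[1:])
--     return []
--
--
-- def tiltDown(board):
--     merged_cols = []
--     for c in range(4):
--         col = [board[r][c] for r in (3, 2, 1, 0)]  # bottom cell first
--         m = _merge([v for v in col if v != 0])
--         merged_cols.append(m + [0] * (4 - len(m)))
--     return [[merged_cols[c][3 - i] for c in range(4)] for i in range(4)]
-- ===== Notes on version B (the rewrite author's own statement) =====
-- stated objective: simpler
-- what changed: Replaces A's rotate-right / per-row slide-loop plus unrolled if-elif merge cascade / rotate-left pipeline with a direct per-column pass: extract each column bottom-first, filter nonzeros, merge equal neighbours with a small recursive merge, pad with zeros, and assemble the result by comprehension without mutation.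
import Mathlib
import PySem

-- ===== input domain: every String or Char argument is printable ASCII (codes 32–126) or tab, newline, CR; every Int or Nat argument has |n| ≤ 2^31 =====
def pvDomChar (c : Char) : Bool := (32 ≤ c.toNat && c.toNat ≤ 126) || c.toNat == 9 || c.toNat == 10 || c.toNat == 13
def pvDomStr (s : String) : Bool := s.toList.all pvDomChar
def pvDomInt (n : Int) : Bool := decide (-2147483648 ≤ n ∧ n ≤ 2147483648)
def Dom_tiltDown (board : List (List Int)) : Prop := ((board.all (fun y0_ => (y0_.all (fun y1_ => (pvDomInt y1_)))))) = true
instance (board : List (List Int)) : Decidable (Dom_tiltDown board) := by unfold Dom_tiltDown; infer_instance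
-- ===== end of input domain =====

-- B replaces A's rotate / unrolled if-elif cascade / rotate-back with a generic per-column
-- recursive merge (filter nonzeros, merge equal neighbours, pad with zeros): simpler, same cost.


-- ===== PORT A =====
-- cell b r c = b[r][c]; indices here are always the literal 0..3 of Python's range(0,4)
-- (Pre_ guarantees they are in range, so the `getD 0` default is never read inside Pre_).
def cellA (b : List (List Int)) (r c : Nat) : Int := (b.getD r []).getD c 0

-- one row of tiltLeft: the slide loop over cols 0..3 (state: new row + `loading`),
-- then A's unrolled if/elif combine-and-slide cascade, step for step.
def tiltLeftRow (brow : List Int) : List Int :=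
  let st := (List.range 4).foldl
    (fun (st : List Int × Nat) col =>
      if brow.getD col 0 ≠ 0 then (st.1.set st.2 (brow.getD col 0), st.2 + 1) else st)
    ([0, 0, 0, 0], 0)
  let nr := st.1
  if nr.getD 0 0 = nr.getD 1 0 then
    let nr := nr.set 0 (nr.getD 0 0 * 2)
    let nr := nr.set 1 (nr.getD 2 0)
    let nr := nr.set 2 (nr.getD 3 0)
    let nr := nr.set 3 0
    if nr.getD 1 0 = nr.getD 2 0 then
      let nr := nr.set 1 (nr.getD 1 0 * 2)
      let nr := nr.set 2 (nr.getD 3 0)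
      nr.set 3 0
    else if nr.getD 2 0 = nr.getD 3 0 then
      (nr.set 2 (nr.getD 2 0 * 2)).set 3 0
    else nr
  else if nr.getD 1 0 = nr.getD 2 0 then
    let nr := nr.set 1 (nr.getD 1 0 * 2)
    let nr := nr.set 2 (nr.getD 3 0)
    nr.set 3 0
  else if nr.getD 2 0 = nr.getD 3 0 then
    (nr.set 2 (nr.getD 2 0 * 2)).set 3 0
  else nr

-- A's row loop writes only into row `row` of newBoard, so it is a map over rows 0..3
def tiltLeft (board : List (List Int)) : List (List Int) :=
  (List.range 4).map (fun row => tiltLeftRow (board.getD row []))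

def tiltDown (board : List (List Int)) : List (List Int) :=
  -- rotate right: newBoard1[col] = [board[3][col], board[2][col], board[1][col], board[0][col]]
  let nb1 := (List.range 4).map (fun col => [3, 2, 1, 0].map (fun row => cellA board row col))
  -- tilt the resulting board left
  let nb1 := tiltLeft nb1
  -- rotate back left: newBoard2[loading][row] = newBoard1[row][3 - loading]
  (List.range 4).map (fun i => (List.range 4).map (fun row => cellA nb1 row (3 - i)))

-- ===== PORT B =====
-- merge equal neighbours front-first, each tile merging at most once (Source B's _merge)
def mergeVals : List Int → List Int
  | a :: b :: rest => if a = b then a * 2 :: mergeVals rest else a :: mergeVals (b :: rest)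
  | l => l

def cellB (b : List (List Int)) (r c : Nat) : Int := (b.getD r []).getD c 0

def tiltDown_alt (board : List (List Int)) : List (List Int) :=
  let ms := (List.range 4).map (fun c =>
    let m := mergeVals (([3, 2, 1, 0].map (fun r => cellB board r c)).filter (fun v => v ≠ 0))
    m ++ List.replicate (4 - m.length) 0)
  (List.range 4).map (fun i => (List.range 4).map (fun c => (ms.getD c []).getD (3 - i) 0))

-- ===== PRECONDITION & SPEC =====
-- Pre_ excludes exactly the boards on which Python's board[row][col] (rows/cols 0..3)
-- raises IndexError: fewer than 4 rows, or one of the first 4 rows shorter than 4.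
def Pre_tiltDown (board : List (List Int)) : Prop :=
  4 ≤ board.length ∧ ∀ r ∈ List.range 4, 4 ≤ (board.getD r []).length
instance (board : List (List Int)) : Decidable (Pre_tiltDown board) := by
  unfold Pre_tiltDown; infer_instance
def pvWitness_tiltDown : List (List Int) :=
  [[0, 0, 0, 0], [0, 2, 0, 0], [0, 2, 4, 0], [2, 0, 4, 0]]

def Spec_tiltDown (board : List (List Int)) (out : List (List Int)) : Prop := out = tiltDown_alt board
instance (board : List (List Int)) (out : List (List Int)) : Decidable (Spec_tiltDown board out) := by unfold Spec_tiltDown; infer_instance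

-- ===== CLAIM (what is proved, stated in full; the proofs are below) =====
def Claim_equal_tiltDown : Prop := ∀ (board : List (List Int)), Dom_tiltDown board → Pre_tiltDown board → Spec_tiltDown board (tiltDown board)

-- ===== LEMMAS AND PROOFS =====

-- the heart: A's slide + cascade on one row equals B's filter/merge/pad on the same values
theorem rowEq (a b c d : Int) :
    tiltLeftRow [a, b, c, d] =
      (mergeVals ([a, b, c, d].filter (fun v => v ≠ 0))) ++
        List.replicate (4 - (mergeVals ([a, b, c, d].filter (fun v => v ≠ 0))).length) 0 := by
  by_cases ha : a = 0 <;> by_cases hb : b = 0 <;> by_cases hc : c = 0 <;> by_cases hd : d = 0 <;>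
    simp [tiltLeftRow, mergeVals, ha, hb, hc, hd, List.range_succ] <;>
    split_ifs <;> simp_all

-- ===== VERDICT (by name: the statement is the Claim_ definition above) =====
theorem tiltDown_spec : Claim_equal_tiltDown := by
  intro board _ _
  unfold Spec_tiltDown tiltDown tiltDown_alt tiltLeft cellA cellB
  simp [List.range_succ, rowEq]
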